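-- pv_equiv track=rewrite | github.com/Ayush10/KernalForge | real_problem_suite.py | _extract_failure_message
-- ===== SOURCE A (Python) =====
-- def _extract_failure_message(stdout: str, stderr: str) -> str:
--     for line in reversed(stdout.splitlines()):
--         stripped = line.strip()
--         if not stripped:
--             continue
--         if "FAIL" in stripped or "Error" in stripped or "failed" in stripped.lower():
--             return stripped
--     stderr = stderr.strip()
--     if stderr:
--         return stderr
--     return "Evaluation failed."
-- ===== SOURCE B (Python) =====
-- def _extract_failure_message(stdout: str, stderr: str) -> str:
--     # Forward scan with an accumulator keeping the LAST matching stripped line,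
--     # instead of A's reverse scan with early return.
--     last_match = None
--     for line in stdout.splitlines():
--         stripped = line.strip()
--         if not stripped:
--             continue
--         if "FAIL" in stripped or "Error" in stripped or "failed" in stripped.lower():
--             last_match = stripped
--     if last_match is not None:
--         return last_match
--     stderr = stderr.strip()
--     if stderr:
--         return stderr
--     return "Evaluation failed."
-- ===== Notes on version B (the rewrite author's own statement) =====
-- stated objective: alternative
-- what changed: Replaces A's reverse scan with early return by a single forward scan that overwrites an accumulator with the last failure-indicating stripped line.
import Mathlib
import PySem

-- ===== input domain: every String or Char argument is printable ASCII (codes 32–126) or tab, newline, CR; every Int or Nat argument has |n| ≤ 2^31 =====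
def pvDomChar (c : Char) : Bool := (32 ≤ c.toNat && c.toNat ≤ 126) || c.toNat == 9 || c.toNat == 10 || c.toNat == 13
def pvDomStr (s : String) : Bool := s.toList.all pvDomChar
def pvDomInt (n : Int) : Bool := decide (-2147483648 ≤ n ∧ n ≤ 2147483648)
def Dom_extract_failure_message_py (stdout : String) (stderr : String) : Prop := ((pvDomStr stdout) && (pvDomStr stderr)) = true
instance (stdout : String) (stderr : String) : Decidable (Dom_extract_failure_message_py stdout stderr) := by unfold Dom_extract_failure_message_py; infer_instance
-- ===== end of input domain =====

-- B replaces A's reverse scan with early return by a forward scan keeping the last match (alternative decomposition, same cost).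

-- ===== PORT A =====
-- the 'for line in reversed(...)' loop with its early return, as structural recursion
def pvALoop : List String → Option String
  | [] => none
  | line :: rest =>
    let stripped := PySem.Str.strip line
    if stripped == "" then pvALoop rest
    else if PySem.Str.isIn "FAIL" stripped || PySem.Str.isIn "Error" stripped
            || PySem.Str.isIn "failed" (PySem.Str.lower stripped) then some stripped
    else pvALoop rest

def extract_failure_message_py (stdout : String) (stderr : String) : String :=
  match pvALoop (PySem.Str.splitlines stdout).reverse with
  | some stripped => stripped
  | none =>
    let stderr' := PySem.Str.strip stderr
    if stderr' == "" then "Evaluation failed." else stderr'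

-- ===== PORT B =====
def extract_failure_message_py_alt (stdout : String) (stderr : String) : String :=
  let last_match := (PySem.Str.splitlines stdout).foldl (fun acc line =>
    let stripped := PySem.Str.strip line
    if stripped == "" then acc
    else if PySem.Str.isIn "FAIL" stripped || PySem.Str.isIn "Error" stripped
            || PySem.Str.isIn "failed" (PySem.Str.lower stripped) then some stripped
    else acc) none
  match last_match with
  | some m => m
  | none =>
    let stderr' := PySem.Str.strip stderr
    if stderr' == "" then "Evaluation failed." else stderr'

-- ===== PRECONDITION & SPEC =====
def Spec_extract_failure_message_py (stdout : String) (stderr : String) (out : String) : Prop := out = extract_failure_message_py_alt stdout stderr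
instance (stdout : String) (stderr : String) (out : String) : Decidable (Spec_extract_failure_message_py stdout stderr out) := by unfold Spec_extract_failure_message_py; infer_instance

-- ===== CLAIM (what is proved, stated in full; the proofs are below) =====
def Claim_equal_extract_failure_message_py : Prop := ∀ (stdout : String) (stderr : String), Dom_extract_failure_message_py stdout stderr → Spec_extract_failure_message_py stdout stderr (extract_failure_message_py stdout stderr)

-- ===== LEMMAS AND PROOFS =====

theorem pvALoop_append (xs ys : List String) :
    pvALoop (xs ++ ys) = match pvALoop xs with
      | some s => some s
      | none => pvALoop ys := by
  induction xs with
  | nil => rfl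
  | cons x xs ih =>
    simp only [List.cons_append, pvALoop]
    split_ifs <;> simp [ih]

theorem pvBLoop_eq (l : List String) (acc : Option String) :
    l.foldl (fun acc line =>
      let stripped := PySem.Str.strip line
      if stripped == "" then acc
      else if PySem.Str.isIn "FAIL" stripped || PySem.Str.isIn "Error" stripped
              || PySem.Str.isIn "failed" (PySem.Str.lower stripped) then some stripped
      else acc) acc
    = match pvALoop l.reverse with
      | some s => some s
      | none => acc := by
  induction l generalizing acc with
  | nil => rfl
  | cons x l ih =>
    simp only [List.foldl_cons, List.reverse_cons, pvALoop_append, ih]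
    cases pvALoop l.reverse with
    | some s => rfl
    | none =>
      simp only [pvALoop]
      split_ifs <;> rfl

-- ===== VERDICT (by name: the statement is the Claim_ definition above) =====
theorem extract_failure_message_py_spec : Claim_equal_extract_failure_message_py := by
  intro stdout stderr _
  unfold Spec_extract_failure_message_py extract_failure_message_py extract_failure_message_py_alt
  rw [pvBLoop_eq]
  cases pvALoop (PySem.Str.splitlines stdout).reverse <;> rfl
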